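-- pv_equiv track=rewrite | github.com/itosha35/Programming | PYTHON/Seminar_3/task_20.py | calcValue
-- ===== SOURCE A (Python) =====
-- def calcValue(word, valset):
--     d = list(valset.keys())
--     s = word.upper()
--     value = 0
--     for i in s:
--         for j in d:
--             if j.count(i) > 0:
--                 value += valset[j]
--     return value
-- ===== SOURCE B (Python) =====
-- def calcValue(word, valset):
--     # One pass over valset building a char -> sum-of-values table, then one lookup pass over word.
--     table = {}
--     for key, val in valset.items():
--         for c in set(key):
--             table[c] = table.get(c, 0) + val
--     return sum(table.get(c, 0) for c in word.upper())
-- ===== Notes on version B (the rewrite author's own statement) =====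
-- stated objective: faster
-- what changed: Instead of scanning every key for every character of the word, B builds a char->sum-of-values table in one pass over valset and then sums one table lookup per character of word.upper().
import Mathlib
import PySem

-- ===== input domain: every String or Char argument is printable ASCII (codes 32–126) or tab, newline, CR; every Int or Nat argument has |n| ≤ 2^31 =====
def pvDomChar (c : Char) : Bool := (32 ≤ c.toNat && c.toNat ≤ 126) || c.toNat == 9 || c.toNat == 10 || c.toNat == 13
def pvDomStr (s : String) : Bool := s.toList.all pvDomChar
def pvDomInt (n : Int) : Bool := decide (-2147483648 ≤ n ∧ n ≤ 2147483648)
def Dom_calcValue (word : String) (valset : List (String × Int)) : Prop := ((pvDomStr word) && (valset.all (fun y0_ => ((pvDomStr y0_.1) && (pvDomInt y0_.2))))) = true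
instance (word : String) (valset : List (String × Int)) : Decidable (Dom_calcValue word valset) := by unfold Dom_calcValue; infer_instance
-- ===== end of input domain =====

-- B replaces A's rescan of every key per word character by a char→sum-of-values table built once (objective: faster, asymptotic).

-- ===== PORT A =====
def calcValue (word : String) (valset : List (String × Int)) : Int :=
  -- d = list(valset.keys()); s = word.upper(); value = 0
  let d := (PySem.Dict.mk valset).keys
  let s := PySem.Str.upper word
  s.toList.foldl (fun value i =>
    d.foldl (fun value j =>
      if 0 < PySem.Str.count j (String.ofList [i]) then
        -- valset[j]: j is drawn from valset's keys, so the lookup always hits; the 0 default is unreachable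
        value + (PySem.Dict.mk valset).getD j 0
      else value) value) 0

-- ===== PORT B =====
def calcValue_alt (word : String) (valset : List (String × Int)) : Int :=
  -- table = {}; for key, val in valset.items(): for c in set(key): table[c] = table.get(c, 0) + val
  let table := valset.foldl
    (fun t kv => (PySem.Set.ofList kv.1.toList).foldl (fun t c => t.modify c 0 (· + kv.2)) t)
    PySem.Dict.empty
  -- sum(table.get(c, 0) for c in word.upper())
  ((PySem.Str.upper word).toList).foldl (fun acc c => acc + table.getD c 0) 0

-- ===== PRECONDITION & SPEC =====
-- Pre_ excludes association lists with duplicate keys: they do not arise from a Python dict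
-- (A's parameter valset IS a dict), so their reading as a dict is ambiguous.
def Pre_calcValue (word : String) (valset : List (String × Int)) : Prop :=
  (valset.map (·.1)).Nodup
instance (word : String) (valset : List (String × Int)) : Decidable (Pre_calcValue word valset) := by unfold Pre_calcValue; infer_instance

def pvWitness_calcValue : String × (List (String × Int)) := ("ab", [("a", 1), ("b", 2)])

def Spec_calcValue (word : String) (valset : List (String × Int)) (out : Int) : Prop := out = calcValue_alt word valset
instance (word : String) (valset : List (String × Int)) (out : Int) : Decidable (Spec_calcValue word valset out) := by unfold Spec_calcValue; infer_instance

-- ===== CLAIM (what is proved, stated in full; the proofs are below) =====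
def Claim_equal_calcValue : Prop := ∀ (word : String) (valset : List (String × Int)), Dom_calcValue word valset → Pre_calcValue word valset → Spec_calcValue word valset (calcValue word valset)

-- ===== LEMMAS AND PROOFS =====

-- the per-character common value: the sum of the values of all entries whose key contains c
def pvChSum (c : Char) (valset : List (String × Int)) : Int :=
  (valset.map (fun kv => if c ∈ kv.1.toList then kv.2 else 0)).sum

-- Python's str.count with a single-character needle counts that character's occurrences
theorem pvCountGoSingle (c : Char) : ∀ (fuel : Nat) (l : List Char) (acc : Nat), l.length ≤ fuel →
    PySem.Chars.count.go [c] fuel l acc = acc + l.count c := by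
  intro fuel
  induction fuel with
  | zero => intro l acc h; cases l with
    | nil => simp [PySem.Chars.count.go]
    | cons a t => simp at h
  | succ n ih => intro l acc h; cases l with
    | nil => simp [PySem.Chars.count.go]
    | cons a t =>
      rw [PySem.Chars.count.go]
      by_cases hca : c = a
      · subst hca
        simp [List.isPrefixOf, ih t (acc + 1) (by simpa using h)]
        omega
      · simp [List.isPrefixOf, Ne.symm hca, hca, ih t acc (by simpa using h)]

theorem pvCountSingle (cs : List Char) (c : Char) : PySem.Chars.count cs [c] = cs.count c := by
  rw [PySem.Chars.count]
  simp [pvCountGoSingle c cs.length cs 0 (le_refl _)]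

-- with distinct keys, looking an entry's key up in the dict returns that entry's value
theorem pvGetOfMem : ∀ (l : List (String × Int)), (l.map (·.1)).Nodup →
    ∀ kv ∈ l, (PySem.Dict.mk l).get? kv.1 = some kv.2 := by
  intro l
  induction l with
  | nil => intro _ kv h; simp at h
  | cons hd tl ih =>
    intro hnd kv hmem
    simp only [List.map_cons, List.nodup_cons] at hnd
    rw [List.mem_cons] at hmem
    rcases hmem with hmem | hmem
    · subst hmem; rw [PySem.Dict.get?_mk_cons]; simp
    · have hne : hd.1 ≠ kv.1 := by
        intro he
        exact hnd.1 (he ▸ List.mem_map_of_mem hmem)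
      rw [PySem.Dict.get?_mk_cons]
      simp only [beq_iff_eq, hne, if_false]
      exact ih hnd.2 kv hmem

-- A's inner loop over the keys adds exactly pvChSum c valset
theorem pvInnerA (valset : List (String × Int)) (hnd : (valset.map (·.1)).Nodup)
    (c : Char) (v0 : Int) :
    ((PySem.Dict.mk valset).keys).foldl (fun v j =>
      if 0 < PySem.Str.count j (String.ofList [c]) then v + (PySem.Dict.mk valset).getD j 0 else v) v0
      = v0 + pvChSum c valset := by
  rw [PySem.Dict.keys_mk, List.foldl_map]
  rw [PySem.List.foldl_congr_mem valset _
    (fun v kv => v + (if c ∈ kv.1.toList then kv.2 else 0)) v0 ?_]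
  · exact PySem.List.foldl_add valset _ v0
  · intro acc kv hkv
    have hget : (PySem.Dict.mk valset).getD kv.1 0 = kv.2 := by
      simp [PySem.Dict.getD, pvGetOfMem valset hnd kv hkv]
    have hcnt : PySem.Str.count kv.1 (String.ofList [c]) = kv.1.toList.count c := by
      simp [PySem.Str.count, pvCountSingle]
    by_cases hc : c ∈ kv.1.toList
    · simp [pvCountSingle, List.count_pos_iff, hc, hget]
    · simp [pvCountSingle, List.count_eq_zero_of_not_mem hc, hc]

-- folding `d[c'] = d.get(c', 0) + v` over cs adds (count of c in cs) * v at key c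
theorem pvModFold (v : Int) (c : Char) : ∀ (cs : List Char) (t : PySem.Dict Char Int),
    (cs.foldl (fun d c' => d.modify c' 0 (· + v)) t).getD c 0 = t.getD c 0 + (cs.count c : Int) * v := by
  intro cs
  induction cs with
  | nil => intro t; simp
  | cons a tl ih =>
    intro t
    rw [List.foldl_cons, ih]
    by_cases hca : c = a
    · subst hca
      rw [PySem.Dict.getD_modify_self]
      simp
      ring
    · rw [PySem.Dict.getD_modify_of_ne _ _ _ hca]
      have hba : (a == c) = false := by simp [Ne.symm hca]
      simp [List.count_cons, hba]

-- B's table lookup at c is pvChSum c valset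
theorem pvTable (c : Char) : ∀ (valset : List (String × Int)) (t : PySem.Dict Char Int),
    (valset.foldl (fun t kv => (PySem.Set.ofList kv.1.toList).foldl (fun t c' => t.modify c' 0 (· + kv.2)) t) t).getD c 0
      = t.getD c 0 + pvChSum c valset := by
  intro valset
  induction valset with
  | nil => intro t; simp [pvChSum]
  | cons kv tl ih =>
    intro t
    rw [List.foldl_cons, ih, pvModFold]
    have hcount : ((PySem.Set.ofList kv.1.toList : List Char).count c : Int)
        = if c ∈ kv.1.toList then 1 else 0 := by
      by_cases hc : c ∈ kv.1.toList
      · have h1 : (PySem.Set.ofList kv.1.toList : List Char).count c = 1 :=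
          List.count_eq_one_of_mem (PySem.Set.nodup_ofList _) ((PySem.Set.mem_ofList _ _).mpr hc)
        simp [hc]
      · have h0 : (PySem.Set.ofList kv.1.toList : List Char).count c = 0 :=
          List.count_eq_zero_of_not_mem (fun h => hc ((PySem.Set.mem_ofList _ _).mp h))
        simp [h0, hc]
    rw [hcount]
    simp only [pvChSum, List.map_cons, List.sum_cons]
    by_cases hc : c ∈ kv.1.toList <;> simp [hc] <;> try ring

-- ===== VERDICT (by name: the statement is the Claim_ definition above) =====
theorem calcValue_spec : Claim_equal_calcValue := by
  intro word valset _ hpre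
  unfold Spec_calcValue
  simp only [calcValue, calcValue_alt]
  rw [PySem.List.foldl_congr_mem ((PySem.Str.upper word).toList) _
    (fun v i => v + pvChSum i valset) 0
    (fun acc i _ => pvInnerA valset hpre i acc)]
  refine (PySem.List.foldl_congr_mem ((PySem.Str.upper word).toList) _
    (fun v i => v + pvChSum i valset) 0 ?_).symm
  intro acc i _
  rw [pvTable i valset PySem.Dict.empty]
  simp [pysem]
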